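-- pv_equiv track=rewrite | github.com/freeipa/freeipa | ipaserver/install/ipa_otptoken_import.py | convertHashName
-- ===== SOURCE A (Python) =====
-- def convertHashName(value):
--     "Converts hash names to their canonical names."
--
--     default_hash = u"sha1"
--     known_prefixes = ("", "hmac-",)
--     known_hashes = {
--         "sha1":    u"sha1",
--         "sha224":  u"sha224",
--         "sha256":  u"sha256",
--         "sha384":  u"sha384",
--         "sha512":  u"sha512",
--         "sha-1":   u"sha1",
--         "sha-224": u"sha224",
--         "sha-256": u"sha256",
--         "sha-384": u"sha384",
--         "sha-512": u"sha512",
--     }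
--
--     if value is None:
--         return default_hash
--
--     v = value.lower()
--     for prefix in known_prefixes:
--         if prefix:
--             w = v[len(prefix):]
--         else:
--             w = v
--         result = known_hashes.get(w)
--         if result is not None:
--             break
--     else:
--         result = default_hash
--
--     return result
-- ===== SOURCE B (Python) =====
-- _BASE = {
--     "sha1":    u"sha1",
--     "sha224":  u"sha224",
--     "sha256":  u"sha256",
--     "sha384":  u"sha384",
--     "sha512":  u"sha512",
--     "sha-1":   u"sha1",
--     "sha-224": u"sha224",
--     "sha-256": u"sha256",
--     "sha-384": u"sha384",
--     "sha-512": u"sha512",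
-- }
--
-- # One flattened table: every accepted spelling, bare or "hmac-"-prefixed,
-- # mapped straight to its canonical name.
-- _FLAT = {}
-- for _k, _v in _BASE.items():
--     _FLAT[_k] = _v
--     _FLAT["hmac-" + _k] = _v
--
--
-- def convertHashName(value):
--     "Converts hash names to their canonical names."
--     if value is None:
--         return u"sha1"
--     return _FLAT.get(value.lower(), u"sha1")
-- ===== Notes on version B (the rewrite author's own statement) =====
-- stated objective: simpler
-- what changed: Replaces A's per-prefix loop with its unchecked slice v[5:] by one flattened dict (each hash name both bare and HMAC-prefixed) built once at import, and a single .get with default.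
-- intended difference: On strings whose lowercase form does not start with the five-character HMAC prefix yet carries, right after its first five characters (whatever they are), a known digest name other than sha1/sha-1 (e.g. 'xxxxxsha256'), A returns that digest because its slice v[5:] never checks which prefix was cut off, while B returns the default u'sha1'; B's value is the intended one. — e.g. on convertHashName(some "xxxxxsha256"): A returns "sha256", B returns "sha1"
import Mathlib
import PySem

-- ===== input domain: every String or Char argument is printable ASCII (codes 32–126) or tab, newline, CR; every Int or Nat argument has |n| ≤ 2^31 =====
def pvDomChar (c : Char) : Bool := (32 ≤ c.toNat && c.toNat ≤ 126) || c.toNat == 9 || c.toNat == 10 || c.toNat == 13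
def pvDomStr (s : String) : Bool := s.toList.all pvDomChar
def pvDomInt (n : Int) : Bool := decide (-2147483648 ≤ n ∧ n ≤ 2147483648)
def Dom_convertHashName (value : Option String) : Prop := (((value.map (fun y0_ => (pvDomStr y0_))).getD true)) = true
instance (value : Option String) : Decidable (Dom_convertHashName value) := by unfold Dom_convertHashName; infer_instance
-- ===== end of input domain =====

-- B replaces A's per-prefix loop (whose slice v[5:] never checks the prefix) by a single
-- lookup in one flattened table built once; objective: simpler (see D_ for the intended
-- difference on A's unchecked-slice inputs).

-- ===== PORT A =====
def pvKnownHashes : PySem.Dict String String :=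
  PySem.Dict.ofList
    [("sha1", "sha1"), ("sha224", "sha224"), ("sha256", "sha256"),
     ("sha384", "sha384"), ("sha512", "sha512"),
     ("sha-1", "sha1"), ("sha-224", "sha224"), ("sha-256", "sha256"),
     ("sha-384", "sha384"), ("sha-512", "sha512")]

-- the for/else loop over known_prefixes: `some r` = break with result, `none` = else branch
def pvLoopA (v : String) : List String → Option String
  | [] => none
  | p :: ps =>
    let w := if p ≠ "" then PySem.Str.slice v (some (PySem.Str.len p)) none else v
    match pvKnownHashes.get? w with
    | some r => some r
    | none => pvLoopA v ps

def convertHashName (value : Option String) : String :=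
  match value with
  | none => "sha1"
  | some value =>
    let v := PySem.Str.lower value
    (pvLoopA v ["", "hmac-"]).getD "sha1"

-- ===== PORT B =====
def pvBaseB : List (String × String) :=
  [("sha1", "sha1"), ("sha224", "sha224"), ("sha256", "sha256"),
   ("sha384", "sha384"), ("sha512", "sha512"),
   ("sha-1", "sha1"), ("sha-224", "sha224"), ("sha-256", "sha256"),
   ("sha-384", "sha384"), ("sha-512", "sha512")]

-- the module-level loop building _FLAT from _BASE.items()
def pvFlat : PySem.Dict String String :=
  (PySem.Dict.ofList pvBaseB).items.foldl
    (fun d kv => (d.insert kv.1 kv.2).insert ("hmac-" ++ kv.1) kv.2) PySem.Dict.empty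

def convertHashName_alt (value : Option String) : String :=
  match value with
  | none => "sha1"
  | some s => pvFlat.getD (PySem.Str.lower s) "sha1"

-- ===== PRECONDITION & SPEC =====
-- On strings whose lowercase form does not start with the five-character HMAC prefix yet
-- carries, right after its first five characters (whatever they are), a known digest name
-- other than sha1/sha-1 (e.g. "xxxxxsha256"), A returns that digest because its slice v[5:]
-- never checks which prefix was cut off, while B returns the default "sha1"; B's value is
-- the intended one.
def pvDcond (s : String) : Bool :=
  let v := PySem.Chars.lower s.toList
  decide (v.take 5 ≠ "hmac-".toList ∧ v.drop 5 ∈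
    ["sha224".toList, "sha256".toList, "sha384".toList, "sha512".toList,
     "sha-224".toList, "sha-256".toList, "sha-384".toList, "sha-512".toList])

def D_convertHashName (value : Option String) : Prop :=
  ((value.map pvDcond).getD false) = true

instance (value : Option String) : Decidable (D_convertHashName value) := by
  unfold D_convertHashName; infer_instance

def Spec_convertHashName (value : Option String) (out : String) : Prop :=
  ¬ D_convertHashName value → out = convertHashName_alt value
instance (value : Option String) (out : String) : Decidable (Spec_convertHashName value out) := by unfold Spec_convertHashName; infer_instance

def pvDiffWitness_convertHashName : Option String := some "xxxxxsha256"
def pvDiffWitnessOut_convertHashName : String × String := ("sha256", "sha1")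

-- ===== CLAIM (what is proved, stated in full; the proofs are below) =====
def Claim_unchanged_convertHashName : Prop := ∀ (value : Option String), Dom_convertHashName value → Spec_convertHashName value (convertHashName value)
def Claim_changed_convertHashName : Prop := Dom_convertHashName (pvDiffWitness_convertHashName) ∧ D_convertHashName (pvDiffWitness_convertHashName) ∧ convertHashName (pvDiffWitness_convertHashName) = pvDiffWitnessOut_convertHashName.1 ∧ convertHashName_alt (pvDiffWitness_convertHashName) = pvDiffWitnessOut_convertHashName.2 ∧ pvDiffWitnessOut_convertHashName.1 ≠ pvDiffWitnessOut_convertHashName.2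
def Claim_exact_convertHashName : Prop := ∀ (value : Option String), Dom_convertHashName value → D_convertHashName value → convertHashName value ≠ convertHashName_alt value

-- ===== LEMMAS AND PROOFS =====

-- proof-side list of the base (un-prefixed) keys, used only to organise the case analysis
def pvDBase : List String :=
  ["sha1", "sha224", "sha256", "sha384", "sha512",
   "sha-1", "sha-224", "sha-256", "sha-384", "sha-512"]

theorem pvHmacMap_eq : pvDBase.map (fun k => "hmac-" ++ k) =
    ["hmac-sha1", "hmac-sha224", "hmac-sha256", "hmac-sha384", "hmac-sha512",
     "hmac-sha-1", "hmac-sha-224", "hmac-sha-256", "hmac-sha-384", "hmac-sha-512"] := by decide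

theorem pvKnown_eq : pvKnownHashes = PySem.Dict.mk
    [("sha1", "sha1"), ("sha224", "sha224"), ("sha256", "sha256"),
     ("sha384", "sha384"), ("sha512", "sha512"),
     ("sha-1", "sha1"), ("sha-224", "sha224"), ("sha-256", "sha256"),
     ("sha-384", "sha384"), ("sha-512", "sha512")] := by decide

theorem pvFlat_eq : pvFlat = PySem.Dict.mk
    [("sha1", "sha1"), ("hmac-sha1", "sha1"),
     ("sha224", "sha224"), ("hmac-sha224", "sha224"),
     ("sha256", "sha256"), ("hmac-sha256", "sha256"),
     ("sha384", "sha384"), ("hmac-sha384", "sha384"),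
     ("sha512", "sha512"), ("hmac-sha512", "sha512"),
     ("sha-1", "sha1"), ("hmac-sha-1", "sha1"),
     ("sha-224", "sha224"), ("hmac-sha-224", "sha224"),
     ("sha-256", "sha256"), ("hmac-sha-256", "sha256"),
     ("sha-384", "sha384"), ("hmac-sha-384", "sha384"),
     ("sha-512", "sha512"), ("hmac-sha-512", "sha512")] := by decide

theorem pvToListEq (a b : String) : a.toList = b.toList ↔ a = b :=
  ⟨fun h => by simpa using congrArg String.ofList h, fun h => by rw [h]⟩

theorem pvW_toList (v : String) :
    (PySem.Str.slice v (some 5) none).toList = v.toList.drop 5 := by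
  simp [pysem]

theorem pvPrefix (v : String) (h : PySem.Str.startswith v "hmac-" = true) :
    v = "hmac-" ++ PySem.Str.slice v (some 5) none := by
  have hp : "hmac-".toList <+: v.toList := by
    simpa [PySem.Chars.startswith_iff] using h
  obtain ⟨t, ht⟩ := hp
  have hw : (PySem.Str.slice v (some 5) none).toList = t := by
    rw [pvW_toList, ← ht]; simp
  have hlist : ("hmac-" ++ PySem.Str.slice v (some 5) none).toList = v.toList := by
    simpa [hw] using ht
  exact ((pvToListEq _ _).mp hlist).symm

theorem pvD_iff (s : String) : pvDcond s = true ↔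
    (PySem.Str.startswith (PySem.Str.lower s) "hmac-" = false ∧
     PySem.Str.slice (PySem.Str.lower s) (some 5) none ∈
       (["sha224", "sha256", "sha384", "sha512",
         "sha-224", "sha-256", "sha-384", "sha-512"] : List String)) := by
  have e0 : PySem.Str.startswith (PySem.Str.lower s) "hmac-"
      = PySem.Chars.startswith (PySem.Chars.lower s.toList) "hmac-".toList := by
    rw [show PySem.Str.startswith (PySem.Str.lower s) "hmac-"
        = PySem.Chars.startswith (PySem.Str.lower s).toList "hmac-".toList from rfl,
      PySem.Str.toList_lower]
  have h5 : "hmac-".toList.length = 5 := by decide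
  have hsw : PySem.Str.startswith (PySem.Str.lower s) "hmac-" = false ↔
      (PySem.Chars.lower s.toList).take 5 ≠ "hmac-".toList := by
    rw [e0, Bool.eq_false_iff, ne_eq, PySem.Chars.startswith_iff,
      List.prefix_iff_eq_take, h5, eq_comm]
  have hsl : ∀ t : String, PySem.Str.slice (PySem.Str.lower s) (some 5) none = t ↔
      (PySem.Chars.lower s.toList).drop 5 = t.toList := by
    intro t
    rw [← pvToListEq, pvW_toList, PySem.Str.toList_lower]
  simp only [pvDcond, decide_eq_true_eq, List.mem_cons, List.not_mem_nil, or_false, hsl, hsw]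

theorem pvKnown_get_none (v : String) (h : v ∉ pvDBase) : pvKnownHashes.get? v = none := by
  simp only [pvDBase, List.mem_cons, not_or] at h
  obtain ⟨h1, h2, h3, h4, h5, h6, h7, h8, h9, h10, -⟩ := h
  rw [pvKnown_eq]
  simp [PySem.Dict.get?, Ne.symm h1, Ne.symm h2, Ne.symm h3, Ne.symm h4, Ne.symm h5,
    Ne.symm h6, Ne.symm h7, Ne.symm h8, Ne.symm h9, Ne.symm h10]

theorem pvFlat_getD_none (v : String) (h : v ∉ pvDBase)
    (h' : v ∉ pvDBase.map (fun k => "hmac-" ++ k)) : pvFlat.getD v "sha1" = "sha1" := by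
  simp only [pvDBase, List.mem_cons, not_or] at h
  rw [pvHmacMap_eq] at h'
  simp only [List.mem_cons, not_or] at h'
  obtain ⟨h1, h2, h3, h4, h5, h6, h7, h8, h9, h10, -⟩ := h
  obtain ⟨g1, g2, g3, g4, g5, g6, g7, g8, g9, g10, -⟩ := h'
  rw [pvFlat_eq, PySem.Dict.getD_eq_get?_getD]
  simp [PySem.Dict.get?,
    Ne.symm h1, Ne.symm h2, Ne.symm h3, Ne.symm h4, Ne.symm h5,
    Ne.symm h6, Ne.symm h7, Ne.symm h8, Ne.symm h9, Ne.symm h10,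
    Ne.symm g1, Ne.symm g2, Ne.symm g3, Ne.symm g4, Ne.symm g5,
    Ne.symm g6, Ne.symm g7, Ne.symm g8, Ne.symm g9, Ne.symm g10]

theorem pvLoopA_eval (v : String) (h : pvKnownHashes.get? v = none) :
    pvLoopA v ["", "hmac-"] = pvKnownHashes.get? (PySem.Str.slice v (some 5) none) := by
  have h5 : PySem.Str.len "hmac-" = (5 : Int) := by decide
  simp only [pvLoopA, h5]
  simp [h]
  cases pvKnownHashes.get? (PySem.Str.slice v (some 5) none) <;> simp [pvLoopA]

set_option maxHeartbeats 1000000 in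
theorem pvD_notBase (v : String)
    (h8 : PySem.Str.slice v (some 5) none ∈
      (["sha224", "sha256", "sha384", "sha512",
        "sha-224", "sha-256", "sha-384", "sha-512"] : List String)) :
    v ∉ pvDBase := by
  intro hv
  simp only [pvDBase, List.mem_cons, List.not_mem_nil, or_false] at hv
  rcases hv with g | g | g | g | g | g | g | g | g | g <;> subst g <;> revert h8 <;> decide

set_option maxHeartbeats 1000000 in
theorem pvD_notHmac (v : String) (hs : PySem.Str.startswith v "hmac-" = false) :
    v ∉ pvDBase.map (fun k => "hmac-" ++ k) := by
  rw [pvHmacMap_eq]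
  intro hv
  simp only [List.mem_cons, List.not_mem_nil, or_false] at hv
  rcases hv with g | g | g | g | g | g | g | g | g | g <;> subst g <;> revert hs <;> decide

set_option maxHeartbeats 1000000 in
theorem pvD_wBase (v : String)
    (h8 : PySem.Str.slice v (some 5) none ∈
      (["sha224", "sha256", "sha384", "sha512",
        "sha-224", "sha-256", "sha-384", "sha-512"] : List String)) :
    PySem.Str.slice v (some 5) none ∈ pvDBase ∧
      PySem.Str.slice v (some 5) none ∉ (["sha1", "sha-1"] : List String) := by
  simp only [List.mem_cons, List.not_mem_nil, or_false] at h8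
  rcases h8 with h | h | h | h | h | h | h | h <;> rw [h] <;> exact ⟨by decide, by decide⟩

set_option maxHeartbeats 1000000 in
theorem pvCore (v : String)
    (hnd : PySem.Str.startswith v "hmac-" = false →
      PySem.Str.slice v (some 5) none ∉
        (["sha224", "sha256", "sha384", "sha512",
          "sha-224", "sha-256", "sha-384", "sha-512"] : List String)) :
    (pvLoopA v ["", "hmac-"]).getD "sha1" = pvFlat.getD v "sha1" := by
  by_cases e1 : v = "sha1"; · subst e1; decide
  by_cases e2 : v = "sha224"; · subst e2; decide
  by_cases e3 : v = "sha256"; · subst e3; decide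
  by_cases e4 : v = "sha384"; · subst e4; decide
  by_cases e5 : v = "sha512"; · subst e5; decide
  by_cases e6 : v = "sha-1"; · subst e6; decide
  by_cases e7 : v = "sha-224"; · subst e7; decide
  by_cases e8 : v = "sha-256"; · subst e8; decide
  by_cases e9 : v = "sha-384"; · subst e9; decide
  by_cases e10 : v = "sha-512"; · subst e10; decide
  by_cases f1 : v = "hmac-sha1"; · subst f1; decide
  by_cases f2 : v = "hmac-sha224"; · subst f2; decide
  by_cases f3 : v = "hmac-sha256"; · subst f3; decide
  by_cases f4 : v = "hmac-sha384"; · subst f4; decide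
  by_cases f5 : v = "hmac-sha512"; · subst f5; decide
  by_cases f6 : v = "hmac-sha-1"; · subst f6; decide
  by_cases f7 : v = "hmac-sha-224"; · subst f7; decide
  by_cases f8 : v = "hmac-sha-256"; · subst f8; decide
  by_cases f9 : v = "hmac-sha-384"; · subst f9; decide
  by_cases f10 : v = "hmac-sha-512"; · subst f10; decide
  have hK : v ∉ pvDBase := by
    simp [pvDBase, e1, e2, e3, e4, e5, e6, e7, e8, e9, e10]
  have hH : v ∉ pvDBase.map (fun k => "hmac-" ++ k) := by
    rw [pvHmacMap_eq]
    simp [f1, f2, f3, f4, f5, f6, f7, f8, f9, f10]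
  rw [pvFlat_getD_none v hK hH, pvLoopA_eval v (pvKnown_get_none v hK)]
  by_cases hwK : PySem.Str.slice v (some 5) none ∈ pvDBase
  · by_cases hs : PySem.Str.startswith v "hmac-" = true
    · exfalso
      have hv := pvPrefix v hs
      simp only [pvDBase, List.mem_cons, List.not_mem_nil, or_false] at hwK
      rcases hwK with h | h | h | h | h | h | h | h | h | h
      · exact f1 (by rw [hv, h]; decide)
      · exact f2 (by rw [hv, h]; decide)
      · exact f3 (by rw [hv, h]; decide)
      · exact f4 (by rw [hv, h]; decide)
      · exact f5 (by rw [hv, h]; decide)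
      · exact f6 (by rw [hv, h]; decide)
      · exact f7 (by rw [hv, h]; decide)
      · exact f8 (by rw [hv, h]; decide)
      · exact f9 (by rw [hv, h]; decide)
      · exact f10 (by rw [hv, h]; decide)
    · have hs' : PySem.Str.startswith v "hmac-" = false := by
        revert hs; cases PySem.Str.startswith v "hmac-" <;> simp
      have h8n := hnd hs'
      simp only [pvDBase, List.mem_cons, List.not_mem_nil, or_false] at hwK
      rcases hwK with h | h | h | h | h | h | h | h | h | h <;>
        first
          | (rw [h]; decide)
          | exact absurd (by rw [h]; decide) h8n
  · rw [pvKnown_get_none _ hwK]; rfl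

set_option maxHeartbeats 1000000 in
theorem pvTightCore (v : String)
    (hK : v ∉ pvDBase) (hH : v ∉ pvDBase.map (fun k => "hmac-" ++ k))
    (hwK : PySem.Str.slice v (some 5) none ∈ pvDBase)
    (hwT : PySem.Str.slice v (some 5) none ∉ (["sha1", "sha-1"] : List String)) :
    (pvLoopA v ["", "hmac-"]).getD "sha1" ≠ pvFlat.getD v "sha1" := by
  rw [pvFlat_getD_none v hK hH, pvLoopA_eval v (pvKnown_get_none v hK)]
  simp only [pvDBase, List.mem_cons, List.not_mem_nil, or_false] at hwK
  simp only [List.mem_cons, List.not_mem_nil, or_false, not_or] at hwT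
  obtain ⟨t1, t2⟩ := hwT
  rcases hwK with h | h | h | h | h | h | h | h | h | h <;>
    first
      | exact absurd h t1
      | exact absurd h t2
      | (rw [h]; decide)

-- ===== VERDICT (by name: the statement is the Claim_ definition above) =====
theorem convertHashName_spec : Claim_unchanged_convertHashName := by
  intro value _hdom hnd
  cases value with
  | none => rfl
  | some s =>
    simp only [D_convertHashName, Option.map_some, Option.getD_some] at hnd
    rw [pvD_iff] at hnd
    exact pvCore (PySem.Str.lower s) (fun hs h8 => hnd ⟨hs, h8⟩)

theorem convertHashName_changed : Claim_changed_convertHashName := by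
  unfold Claim_changed_convertHashName; decide

theorem convertHashName_tight : Claim_exact_convertHashName := by
  intro value _hdom hd
  cases value with
  | none => exact absurd hd (by simp [D_convertHashName])
  | some s =>
    simp only [D_convertHashName, Option.map_some, Option.getD_some] at hd
    obtain ⟨hs, h8⟩ := (pvD_iff s).mp hd
    obtain ⟨hwK, hwT⟩ := pvD_wBase (PySem.Str.lower s) h8
    exact pvTightCore (PySem.Str.lower s) (pvD_notBase _ h8) (pvD_notHmac _ hs) hwK hwT
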